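-- pv_equiv track=rewrite | github.com/electronicayciencia/rfid-rw | soft_pc/em4205.py | biphase2manchester
-- ===== SOURCE A (Python) =====
-- def biphase2manchester(nbits, number):
--     """
--     Correct the bits of a message that has been read as it were biphase
--     encoded but it was indeed manchester.
--
--     Input:
--            nbits: length of the message in bits
--           number: message read as bihpase
--
--     Output:
--         message read as manchester
--     """
--
--     number >>= 1
--     man = 0
--
--     b = 0
--     for i in range(nbits-1, -1, -1):
--         if (number >> i) & 1:
--             b ^= 1
--         man <<= 1
--         man |= b
--
--     return man
-- ===== SOURCE B (Python) =====
-- def biphase2manchester(nbits, number):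
--     """Bit-parallel version: mask to nbits bits, then inclusive prefix-XOR
--     from the MSB via doubling shifts (n ^= n >> s, s = 1, 2, 4, ...)."""
--     if nbits <= 0:
--         return 0
--     n = (number >> 1) & ((1 << nbits) - 1)
--     s = 1
--     while s < nbits:
--         n ^= n >> s
--         s <<= 1
--     return n
-- ===== Notes on version B (the rewrite author's own statement) =====
-- stated objective: faster
-- what changed: Replaces the sequential per-bit running-parity loop (one iteration per bit, building the result bit by bit) with a bit-parallel inclusive prefix-XOR: mask to nbits bits once, then n ^= n >> s with s doubling 1,2,4,... until s >= nbits.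
import Mathlib
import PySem

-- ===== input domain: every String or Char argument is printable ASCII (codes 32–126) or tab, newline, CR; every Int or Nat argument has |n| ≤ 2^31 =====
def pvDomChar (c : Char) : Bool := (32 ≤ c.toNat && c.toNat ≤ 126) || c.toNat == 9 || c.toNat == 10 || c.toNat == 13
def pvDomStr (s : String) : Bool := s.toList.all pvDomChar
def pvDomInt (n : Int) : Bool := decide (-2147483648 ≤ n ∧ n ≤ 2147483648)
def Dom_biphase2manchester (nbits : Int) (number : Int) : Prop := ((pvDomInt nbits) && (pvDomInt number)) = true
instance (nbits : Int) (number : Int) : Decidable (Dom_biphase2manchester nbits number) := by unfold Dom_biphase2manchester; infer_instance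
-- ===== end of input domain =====

-- B replaces A's per-bit running-parity loop by a bit-parallel prefix-XOR
-- with doubling shifts (O(log nbits) arithmetic steps instead of O(nbits)).

-- ===== PORT A =====
-- literal port: number >>= 1; then for i in range(nbits-1, -1, -1):
--   if (number >> i) & 1: b ^= 1;  man <<= 1;  man |= b;  return man
def biphase2manchester (nbits : Int) (number : Int) : Int :=
  let num := number >>> (1 : Nat)
  ((PySem.List.pyRange (nbits - 1) (-1) (-1)).foldl
    (fun (st : Int × Int) (i : Int) =>
      let b := if PySem.Int.band (num >>> i.toNat) 1 = 1 then PySem.Int.bxor st.2 1 else st.2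
      (PySem.Int.bor (st.1 <<< (1 : Nat)) b, b))
    (0, 0)).1

-- ===== PORT B =====
-- while s < nbits: n ^= n >> s; s <<= 1
-- (the `0 < s` conjunct is a termination guard only: Python's s starts at 1
--  and doubles, so it always holds on the calls the port actually makes)
def b2mXorShifts (nbits : Int) (n : Int) (s : Nat) : Int :=
  if _h : 0 < s ∧ (s : Int) < nbits then
    b2mXorShifts nbits (PySem.Int.bxor n (n >>> s)) (s <<< 1)
  else n
termination_by nbits.toNat - s
decreasing_by
  simp only [Nat.shiftLeft_eq, pow_one]
  omega

-- if nbits <= 0: return 0;  n = (number >> 1) & ((1 << nbits) - 1);  loop;  return n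
def biphase2manchester_alt (nbits : Int) (number : Int) : Int :=
  if nbits ≤ 0 then 0
  else b2mXorShifts nbits
    (PySem.Int.band (number >>> (1 : Nat)) (((1 : Int) <<< nbits.toNat) - 1)) 1

-- ===== PRECONDITION & SPEC =====
def Spec_biphase2manchester (nbits : Int) (number : Int) (out : Int) : Prop := out = biphase2manchester_alt nbits number
instance (nbits : Int) (number : Int) (out : Int) : Decidable (Spec_biphase2manchester nbits number out) := by unfold Spec_biphase2manchester; infer_instance

-- ===== CLAIM (what is proved, stated in full; the proofs are below) =====
def Claim_equal_biphase2manchester : Prop := ∀ (nbits : Int) (number : Int), Dom_biphase2manchester nbits number → Spec_biphase2manchester nbits number (biphase2manchester nbits number)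

-- ===== LEMMAS AND PROOFS =====

/-- parity (XOR) of bits j, j+1, …, j+k-1 of M -/
def parBits (M j k : Nat) : Bool :=
  (List.range k).foldl (fun a t => xor a (M.testBit (j + t))) false

theorem parBits_zero (M j : Nat) : parBits M j 0 = false := rfl

theorem parBits_succ (M j k : Nat) :
    parBits M j (k + 1) = xor (parBits M j k) (M.testBit (j + k)) := by
  simp [parBits, List.range_succ]

theorem parBits_one (M j : Nat) : parBits M j 1 = M.testBit j := by
  simp [parBits]

theorem parBits_add (M j a b : Nat) :
    parBits M j (a + b) = xor (parBits M j a) (parBits M (j + a) b) := by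
  induction b with
  | zero => simp [parBits_zero]
  | succ b ih =>
      rw [← Nat.add_assoc, parBits_succ, ih, parBits_succ, Bool.xor_assoc, ← Nat.add_assoc]

theorem parBits_stable (M N j k : Nat) (hM : M < 2 ^ N) (hk : N - j ≤ k) :
    parBits M j k = parBits M j (N - j) := by
  induction k with
  | zero =>
      have h0 : N - j = 0 := by omega
      rw [h0]
  | succ k ih =>
      rcases Nat.lt_or_ge (N - j) (k + 1) with h | h
      · have hbit : M.testBit (j + k) = false := by
          apply Nat.testBit_lt_two_pow
          calc M < 2 ^ N := hM
            _ ≤ 2 ^ (j + k) := Nat.pow_le_pow_right (by norm_num) (by omega)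
        rw [parBits_succ, hbit, Bool.xor_false, ih (by omega)]
      · have h1 : N - j = k + 1 := by omega
        rw [h1]

theorem band_mask (m : Int) (N : Nat) :
    PySem.Int.band m (((1 : Int) <<< N) - 1) = m.emod (2 ^ N) := by
  have hee : ∀ a b : Int, Int.emod a b = a % b := fun _ _ => rfl
  have hone : (1 : Nat) ≤ 2 ^ N := Nat.one_le_two_pow
  have hmask : ((1 : Int) <<< N) - 1 = ((2 ^ N - 1 : Nat) : Int) := by
    rw [Int.shiftLeft_eq, one_mul, Nat.cast_sub hone, Nat.cast_one]
    push_cast; ring_nf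
  have hPI : (((2 ^ N : Nat) : Int)) = (2 : Int) ^ N := by push_cast; ring
  rw [hee, ← hPI]
  by_cases hm : 0 ≤ m
  · rw [hmask, PySem.Int.band_of_nonneg hm (by positivity)]
    rw [Int.toNat_natCast, Nat.and_two_pow_sub_one_eq_mod]
    conv_rhs => rw [← Int.toNat_of_nonneg hm]
    push_cast
    rfl
  · have hb : (0 : Int) ≤ ((2 ^ N - 1 : Nat) : Int) := by positivity
    rw [hmask]
    unfold PySem.Int.band
    rw [if_neg hm, if_pos hb, Int.toNat_natCast]
    rw [not_le] at hm
    set n' : Nat := (-m - 1).toNat with hn'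
    have hmn : m = -1 - (n' : Int) := by
      have : ((-m - 1).toNat : Int) = -m - 1 := Int.toNat_of_nonneg (by omega)
      omega
    rw [Nat.and_comm, Nat.and_two_pow_sub_one_eq_mod]
    have hdm : 2 ^ N * (n' / 2 ^ N) + n' % 2 ^ N = n' := Nat.div_add_mod n' (2 ^ N)
    have hr : n' % 2 ^ N < 2 ^ N := Nat.mod_lt _ (by positivity)
    have hm2 : m = ((((2 ^ N - 1 - n' % 2 ^ N : Nat)) : Int))
        + (-((n' / 2 ^ N : Nat) : Int) - 1) * ((2 ^ N : Nat) : Int) := by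
      have hprod : (-((n' / 2 ^ N : Nat) : Int) - 1) * ((2 ^ N : Nat) : Int)
          = -(((2 ^ N * (n' / 2 ^ N) : Nat)) : Int) - ((2 ^ N : Nat) : Int) := by
        push_cast; ring
      rw [hmn, hprod]; omega
    conv_rhs => rw [hm2]
    rw [Int.add_mul_emod_self_right, Int.emod_eq_of_lt (by positivity) (by omega)]

theorem bit_bridge (m : Int) (N i : Nat) (hi : i < N) :
    (PySem.Int.band (m >>> i) 1 = 1) ↔ Nat.testBit ((m.emod (2 ^ N)).toNat) i := by
  have hee : ∀ a b : Int, Int.emod a b = a % b := fun _ _ => rfl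
  rw [PySem.Int.band_one, PySem.Int.mod_eq_emod_of_pos (by norm_num), hee]
  rw [Int.shiftRight_eq_div_pow]
  set t : Int := m % ((2 : Int) ^ N) with ht
  have ht0 : 0 ≤ t := Int.emod_nonneg m (by positivity)
  have hdm : t + 2 ^ N * (m / 2 ^ N) = m := Int.emod_add_mul_ediv m (2 ^ N)
  have hsplit : m / ((2 ^ i : Nat) : Int) = t / ((2 ^ i : Nat) : Int) + (m / 2 ^ N) * 2 ^ (N - i) := by
    have h1 : m = t + ((m / 2 ^ N) * 2 ^ (N - i)) * ((2 ^ i : Nat) : Int) := by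
      push_cast
      rw [mul_assoc, ← pow_add (2 : Int), show N - i + i = N by omega]
      linear_combination -hdm
    conv_lhs => rw [h1]
    rw [Int.add_mul_ediv_right _ _ (by positivity)]
  rw [hsplit]
  have h2 : (t / ((2 ^ i : Nat) : Int) + (m / 2 ^ N) * 2 ^ (N - i)) % 2
      = t / ((2 ^ i : Nat) : Int) % 2 := by
    rw [show (2 : Int) ^ (N - i) = ((2 ^ (N - i - 1)) : Int) * 2 by
      rw [← pow_succ]; congr 1; omega, ← mul_assoc, Int.add_mul_emod_self_right]
  rw [h2]
  conv_lhs => rw [← Int.toNat_of_nonneg ht0]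
  rw [Nat.testBit_eq_decide_div_mod_eq]
  rw [← Int.natCast_ediv]
  norm_cast
  simp

theorem int_shiftRight_natCast (w s : Nat) : ((w : Int) >>> s) = ((w >>> s : Nat) : Int) := by
  rw [Int.shiftRight_eq_div_pow, Nat.shiftRight_eq_div_pow, Int.natCast_ediv]

theorem int_shiftLeft_one_natCast (u : Nat) : ((u : Int) <<< (1 : Nat)) = ((u <<< 1 : Nat) : Int) := by
  rw [Int.shiftLeft_eq, Nat.shiftLeft_eq]
  push_cast
  ring

theorem testBit_cond01 (c : Bool) (t : Nat) :
    (cond c 1 0 : Nat).testBit t = (c && decide (t = 0)) := by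
  cases c
  · simp
  · cases t with
    | zero => simp
    | succ t =>
        have h1 : (1 : Nat) < 2 ^ (t + 1) := Nat.one_lt_two_pow (by omega)
        simp [Nat.testBit_eq_decide_div_mod_eq, Nat.div_eq_of_lt h1]

theorem bxor_cond01 (b : Bool) :
    PySem.Int.bxor ((cond b 1 0 : Nat) : Int) 1 = ((cond (!b) 1 0 : Nat) : Int) := by
  cases b <;> decide

theorem b2m_loop (N M : Nat) (hM : M < 2 ^ N) :
    ∀ d s (w : Nat), d = N - s → 1 ≤ s → (∀ j, w.testBit j = parBits M j s) →
    ∃ r : Nat, b2mXorShifts (N : Int) (w : Int) s = (r : Int) ∧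
      ∀ j, r.testBit j = (decide (j < N) && parBits M j (N - j)) := by
  intro d
  induction d using Nat.strong_induction_on with
  | _ d ih =>
    intro s w hd hs hw
    rw [b2mXorShifts]
    by_cases hc : 0 < s ∧ (s : Int) < (N : Int)
    · rw [dif_pos hc]
      have hsN : s < N := by exact_mod_cast hc.2
      have hcast : PySem.Int.bxor (w : Int) ((w : Int) >>> s) = ((w ^^^ (w >>> s) : Nat) : Int) := by
        rw [int_shiftRight_natCast, PySem.Int.bxor_natCast]
      rw [hcast]
      have hinv : ∀ j, (w ^^^ (w >>> s)).testBit j = parBits M j (s <<< 1) := by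
        intro j
        rw [Nat.testBit_xor, Nat.testBit_shiftRight, hw, hw, Nat.shiftLeft_eq, pow_one,
          Nat.mul_two, parBits_add, Nat.add_comm s j]
      exact ih (N - s <<< 1) (by simp only [Nat.shiftLeft_eq, pow_one]; omega)
        (s <<< 1) _ rfl (by simp only [Nat.shiftLeft_eq, pow_one]; omega) hinv
    · rw [dif_neg hc]
      refine ⟨w, rfl, ?_⟩
      have hsge : N ≤ s := by
        by_contra hlt
        exact hc ⟨by omega, by exact_mod_cast Nat.lt_of_not_ge (fun h => hlt (by omega))⟩
      intro j
      rw [hw j, parBits_stable M N j s hM (by omega)]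
      by_cases hj : j < N
      · simp [hj]
      · have h0 : N - j = 0 := by omega
        simp [h0, parBits_zero, hj]

theorem foldA (N : Nat) (m : Int) (M : Nat) (hMc : (M : Int) = m.emod (2 ^ N)) :
    ∀ k, k ≤ N →
    ∃ u : Nat,
      (((List.range k).map (fun j : Nat => (N : Int) - 1 - (j : Int))).foldl
        (fun (st : Int × Int) (i : Int) =>
          let b := if PySem.Int.band ((m >>> i.toNat)) 1 = 1 then PySem.Int.bxor st.2 1 else st.2
          (PySem.Int.bor (st.1 <<< (1 : Nat)) b, b))
        (0, 0))
        = ((u : Int), ((cond (parBits M (N - k) k) 1 0 : Nat) : Int)) ∧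
      ∀ j, u.testBit j = (decide (j < k) && parBits M (N - k + j) (k - j)) := by
  intro k
  induction k with
  | zero =>
      intro _
      exact ⟨0, by simp [parBits_zero], by simp⟩
  | succ k ih =>
      intro hk
      obtain ⟨u, hfold, hbits⟩ := ih (by omega)
      rw [List.range_succ, List.map_append, List.foldl_append, hfold]
      simp only [List.map_cons, List.map_nil, List.foldl_cons, List.foldl_nil]
      have hidx : ((N : Int) - 1 - (k : Int)).toNat = N - 1 - k := by omega
      have hiN : N - 1 - k < N := by omega
      have hMt : (m.emod (2 ^ N)).toNat = M := by
        rw [← hMc, Int.toNat_natCast]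
      have hcondE : (PySem.Int.band (m >>> ((N : Int) - 1 - (k : Int)).toNat) 1 = 1)
          ↔ (M.testBit (N - 1 - k) = true) := by
        rw [hidx, bit_bridge m N _ hiN, hMt]
      set c := parBits M (N - k) k with hc
      set c' := parBits M (N - (k + 1)) (k + 1) with hc'
      have hc'x : c' = xor (M.testBit (N - 1 - k)) c := by
        rw [hc', show N - (k+1) = N - 1 - k by omega, show k + 1 = 1 + k by omega,
          parBits_add, parBits_one, show N - 1 - k + 1 = N - k by omega]
      have hbval : (if PySem.Int.band (m >>> ((N : Int) - 1 - (k : Int)).toNat) 1 = 1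
            then PySem.Int.bxor ((cond c 1 0 : Nat) : Int) 1 else ((cond c 1 0 : Nat) : Int))
          = ((cond c' 1 0 : Nat) : Int) := by
        by_cases hbit : M.testBit (N - 1 - k) = true
        · rw [if_pos (hcondE.mpr hbit), bxor_cond01]
          rw [hc'x, hbit]
          cases c <;> rfl
        · rw [if_neg (fun hh => hbit (hcondE.mp hh)), hc'x,
            Bool.eq_false_iff.mpr hbit]
          cases c <;> rfl
      refine ⟨(u <<< 1) ||| (cond c' 1 0), ?_, ?_⟩
      · rw [hbval, int_shiftLeft_one_natCast, PySem.Int.bor_natCast]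
      · intro j
        rw [Nat.testBit_or, Nat.testBit_shiftLeft, testBit_cond01]
        cases j with
        | zero => simp [hc']
        | succ j =>
            have e1 : N - (k + 1) + (j + 1) = N - k + j := by omega
            have e2 : k + 1 - (j + 1) = k - j := by omega
            simp only [Nat.add_sub_cancel, hbits j, e1, e2]
            simp

-- ===== VERDICT (by name: the statement is the Claim_ definition above) =====
theorem biphase2manchester_spec : Claim_equal_biphase2manchester := by
  intro nbits number _
  unfold Spec_biphase2manchester biphase2manchester biphase2manchester_alt
  by_cases hnb : nbits ≤ 0
  · rw [if_pos hnb, PySem.List.pyRange_neg_one_eq_nil (by omega)]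
    rfl
  · rw [if_neg hnb]
    set N := nbits.toNat with hNdef
    have hN : nbits = (N : Int) := by omega
    set m := number >>> (1 : Nat) with hm
    set M : Nat := (m.emod (2 ^ N)).toNat with hMdef
    have hMc : (M : Int) = m.emod (2 ^ N) :=
      Int.toNat_of_nonneg (Int.emod_nonneg _ (by positivity))
    have hMlt : M < 2 ^ N := by
      have h2 : m.emod (2 ^ N) < 2 ^ N := Int.emod_lt_of_pos _ (by positivity)
      rw [← hMc] at h2
      exact_mod_cast h2
    have hlist : PySem.List.pyRange (nbits - 1) (-1) (-1)
        = (List.range N).map (fun j : Nat => (N : Int) - 1 - (j : Int)) := by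
      rw [hN, PySem.List.pyRange_neg_one,
        show ((N : Int) - 1 - -1).toNat = N from by omega]
    obtain ⟨u, hfold, hubits⟩ := foldA N m M hMc N (le_refl N)
    simp only [hlist]
    rw [hfold, band_mask, ← hMc]
    obtain ⟨r, hr, hrbits⟩ :=
      b2m_loop N M hMlt (N - 1) 1 M rfl (le_refl 1) (fun j => (parBits_one M j).symm)
    rw [hN, hr]
    have hur : u = r := Nat.eq_of_testBit_eq (fun j => by
      rw [hubits j, hrbits j]
      simp)
    rw [hur]
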